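-- pv_equiv track=rewrite | github.com/NegaShree-12/AI-Exam-Proctor | backend/analytics_engine.py | _group_performance
-- ===== SOURCE A (Python) =====
-- def _group_performance(scores):
--     """Group students by performance"""
--     if not scores:
--         return {'excellent': 0, 'good': 0, 'fair': 0, 'poor': 0}
--
--     return {
--         'excellent': len([s for s in scores if s >= 90]),
--         'good': len([s for s in scores if 80 <= s < 90]),
--         'fair': len([s for s in scores if 70 <= s < 80]),
--         'poor': len([s for s in scores if s < 70])
--     }
-- ===== SOURCE B (Python) =====
-- def _group_performance(scores):
--     counts = {'excellent': 0, 'good': 0, 'fair': 0, 'poor': 0}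
--     for s in scores:
--         if s >= 90:
--             counts['excellent'] += 1
--         elif s >= 80:
--             counts['good'] += 1
--         elif s >= 70:
--             counts['fair'] += 1
--         else:
--             counts['poor'] += 1
--     return counts
-- ===== Notes on version B (the rewrite author's own statement) =====
-- stated objective: simpler
-- what changed: Replaces four separate list-comprehension scans (plus an empty-list guard) with a single pass over scores that increments one of four zero-initialized counters via an if/elif chain.
import Mathlib
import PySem

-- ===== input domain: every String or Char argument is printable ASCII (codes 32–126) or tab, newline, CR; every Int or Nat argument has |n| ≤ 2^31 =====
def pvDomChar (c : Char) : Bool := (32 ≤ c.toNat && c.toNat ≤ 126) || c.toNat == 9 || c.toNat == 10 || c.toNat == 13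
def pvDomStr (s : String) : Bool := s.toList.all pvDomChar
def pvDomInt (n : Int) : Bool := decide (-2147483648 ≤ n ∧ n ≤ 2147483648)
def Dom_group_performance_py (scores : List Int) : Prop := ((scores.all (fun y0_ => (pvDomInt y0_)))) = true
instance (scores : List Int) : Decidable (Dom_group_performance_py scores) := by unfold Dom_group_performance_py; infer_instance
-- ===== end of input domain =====

-- B replaces A's four separate filter scans with one single-pass counter loop (simpler).


-- ===== PORT A =====
def group_performance_py (scores : List Int) : List (String × Int) :=
  if scores = [] then
    [("excellent", 0), ("good", 0), ("fair", 0), ("poor", 0)]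
  else
    [("excellent", ((scores.filter (fun s => s ≥ 90)).length : Int)),
     ("good", ((scores.filter (fun s => 80 ≤ s ∧ s < 90)).length : Int)),
     ("fair", ((scores.filter (fun s => 70 ≤ s ∧ s < 80)).length : Int)),
     ("poor", ((scores.filter (fun s => s < 70)).length : Int))]

-- ===== PORT B =====
def group_performance_py_alt (scores : List Int) : List (String × Int) :=
  let c := scores.foldl
    (fun (c : Int × Int × Int × Int) s =>
      if s ≥ 90 then (c.1 + 1, c.2.1, c.2.2.1, c.2.2.2)
      else if s ≥ 80 then (c.1, c.2.1 + 1, c.2.2.1, c.2.2.2)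
      else if s ≥ 70 then (c.1, c.2.1, c.2.2.1 + 1, c.2.2.2)
      else (c.1, c.2.1, c.2.2.1, c.2.2.2 + 1))
    (0, 0, 0, 0)
  [("excellent", c.1), ("good", c.2.1), ("fair", c.2.2.1), ("poor", c.2.2.2)]

-- ===== PRECONDITION & SPEC =====
def Spec_group_performance_py (scores : List Int) (out : List (String × Int)) : Prop := out = group_performance_py_alt scores
instance (scores : List Int) (out : List (String × Int)) : Decidable (Spec_group_performance_py scores out) := by unfold Spec_group_performance_py; infer_instance

-- ===== CLAIM (what is proved, stated in full; the proofs are below) =====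
def Claim_equal_group_performance_py : Prop := ∀ (scores : List Int), Dom_group_performance_py scores → Spec_group_performance_py scores (group_performance_py scores)

-- ===== LEMMAS AND PROOFS =====

-- The fold's accumulator is the four filter-lengths, shifted by the initial accumulator.
theorem pv_fold_counts (scores : List Int) (a b c d : Int) :
    scores.foldl
      (fun (c : Int × Int × Int × Int) s =>
        if s ≥ 90 then (c.1 + 1, c.2.1, c.2.2.1, c.2.2.2)
        else if s ≥ 80 then (c.1, c.2.1 + 1, c.2.2.1, c.2.2.2)
        else if s ≥ 70 then (c.1, c.2.1, c.2.2.1 + 1, c.2.2.2)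
        else (c.1, c.2.1, c.2.2.1, c.2.2.2 + 1))
      (a, b, c, d)
    = (a + ((scores.filter (fun s => s ≥ 90)).length : Int),
       b + ((scores.filter (fun s => 80 ≤ s ∧ s < 90)).length : Int),
       c + ((scores.filter (fun s => 70 ≤ s ∧ s < 80)).length : Int),
       d + ((scores.filter (fun s => s < 70)).length : Int)) := by
  induction scores generalizing a b c d with
  | nil => simp
  | cons x xs ih =>
    simp only [List.foldl_cons, List.filter_cons]
    by_cases h1 : x ≥ 90
    · simp [h1, ih, show ¬ (80 ≤ x ∧ x < 90) by omega, show ¬ (70 ≤ x ∧ x < 80) by omega,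
        show ¬ x < 70 by omega]; omega
    · by_cases h2 : x ≥ 80
      · simp [h1, h2, ih, show (80 ≤ x ∧ x < 90) by omega, show ¬ (70 ≤ x ∧ x < 80) by omega,
          show ¬ x < 70 by omega]; omega
      · by_cases h3 : x ≥ 70
        · simp [h1, h2, h3, ih, show ¬ (80 ≤ x ∧ x < 90) by omega, show (70 ≤ x ∧ x < 80) by omega,
            show ¬ x < 70 by omega]; omega
        · simp [h1, h2, h3, ih, show ¬ (80 ≤ x ∧ x < 90) by omega, show ¬ (70 ≤ x ∧ x < 80) by omega,
            show x < 70 by omega]; omega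

-- ===== VERDICT (by name: the statement is the Claim_ definition above) =====
theorem group_performance_py_spec : Claim_equal_group_performance_py := by
  intro scores _
  show group_performance_py scores = group_performance_py_alt scores
  unfold group_performance_py group_performance_py_alt
  rw [pv_fold_counts]
  by_cases h : scores = []
  · subst h; simp
  · simp [h]
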